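-- pv_equiv track=rewrite | github.com/robo919/ML_BASED_PH | src/advanced_typosquatting_detector.py | _is_transposition
-- ===== SOURCE A (Python) =====
-- def _is_transposition(domain: str, brand: str) -> bool:
--     """Check if domain is brand with two adjacent characters swapped"""
--     if len(domain) != len(brand):
--         return False
--     for i in range(len(brand) - 1):
--         swapped = brand[:i] + brand[i+1] + brand[i] + brand[i+2:]
--         if swapped == domain:
--             return True
--     return False
-- ===== SOURCE B (Python) =====
-- def _is_transposition(domain: str, brand: str) -> bool:
--     """Check if domain is brand with two adjacent characters swapped (single pass)."""
--     if len(domain) != len(brand):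
--         return False
--     diffs = [k for k in range(len(brand)) if domain[k] != brand[k]]
--     if not diffs:
--         # identical strings: a swap of two equal adjacent chars is a no-op
--         return any(brand[i] == brand[i + 1] for i in range(len(brand) - 1))
--     if len(diffs) != 2:
--         return False
--     i, j = diffs
--     return j == i + 1 and domain[i] == brand[j] and domain[j] == brand[i]
-- ===== Notes on version B (the rewrite author's own statement) =====
-- stated objective: faster
-- what changed: Instead of rebuilding a candidate swapped string for every index and comparing, B makes one pass collecting the indices where the strings differ and checks they are exactly two adjacent crossed positions (or none, with some equal adjacent pair in brand).
import Mathlib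
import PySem

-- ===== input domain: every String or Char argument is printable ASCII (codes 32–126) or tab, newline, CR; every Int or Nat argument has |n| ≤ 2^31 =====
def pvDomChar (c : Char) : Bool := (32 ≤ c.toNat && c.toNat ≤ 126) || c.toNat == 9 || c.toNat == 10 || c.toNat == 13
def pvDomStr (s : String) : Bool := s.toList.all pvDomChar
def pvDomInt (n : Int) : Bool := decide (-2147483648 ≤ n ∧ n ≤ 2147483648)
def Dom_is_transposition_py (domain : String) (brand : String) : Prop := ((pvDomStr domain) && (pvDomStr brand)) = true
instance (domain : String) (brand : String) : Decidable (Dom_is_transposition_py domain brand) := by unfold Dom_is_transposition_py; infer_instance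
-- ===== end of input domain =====

-- B replaces A's per-index rebuild-and-compare (O(n^2)) by a single pass over the differing
-- positions (O(n)); proved to return the same Bool on all inputs.


-- ===== PORT A =====
-- swapped = brand[:i] + brand[i+1] + brand[i] + brand[i+2:]  (the two single-char indexings
-- are always in range for the loop's indices, so Option.toList never yields [])
def pvSwapA (b : List Char) (i : Int) : List Char :=
  PySem.List.slice b none (some i) ++ (PySem.List.pyGet? b (i + 1)).toList
    ++ (PySem.List.pyGet? b i).toList ++ PySem.List.slice b (some (i + 2)) none

def is_transposition_py (domain : String) (brand : String) : Bool :=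
  if domain.toList.length ≠ brand.toList.length then false
  else
    (PySem.List.pyRange 0 ((brand.toList.length : Int) - 1) 1).any
      (fun i => pvSwapA brand.toList i == domain.toList)

-- ===== PORT B =====
def is_transposition_py_alt (domain : String) (brand : String) : Bool :=
  let d := domain.toList
  let b := brand.toList
  if d.length ≠ b.length then false
  else
    let diffs := (List.range b.length).filter (fun k => !(d.getD k ' ' == b.getD k ' '))
    match diffs with
    | [] => (List.range (b.length - 1)).any (fun i => b.getD i ' ' == b.getD (i + 1) ' ')
    | [i, j] => j == i + 1 && d.getD i ' ' == b.getD j ' ' && d.getD j ' ' == b.getD i ' '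
    | _ => false

-- ===== PRECONDITION & SPEC =====
def Spec_is_transposition_py (domain : String) (brand : String) (out : Bool) : Prop := out = is_transposition_py_alt domain brand
instance (domain : String) (brand : String) (out : Bool) : Decidable (Spec_is_transposition_py domain brand out) := by unfold Spec_is_transposition_py; infer_instance

-- ===== CLAIM (what is proved, stated in full; the proofs are below) =====
def Claim_equal_is_transposition_py : Prop := ∀ (domain : String) (brand : String), Dom_is_transposition_py domain brand → Spec_is_transposition_py domain brand (is_transposition_py domain brand)

-- ===== LEMMAS AND PROOFS =====

-- the swapped list pvSwapA computes, on natural in-range indices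
def pvSw (b : List Char) (i : Nat) : List Char :=
  b.take i ++ [b.getD (i + 1) ' ', b.getD i ' '] ++ b.drop (i + 2)

theorem pvSw_getD (b : List Char) (i k : Nat) (hi : i + 1 < b.length) (hk : k < b.length) :
    (pvSw b i).getD k ' ' =
      if k = i then b.getD (i + 1) ' ' else if k = i + 1 then b.getD i ' ' else b.getD k ' ' := by
  unfold pvSw
  have hti : (b.take i).length = i := by simp; omega
  rw [List.append_assoc]
  simp only [List.getD_eq_getElem?_getD, List.getElem?_append, hti]
  by_cases h1 : k < i
  · rw [if_pos h1, List.getElem?_take_of_lt h1, if_neg (by omega), if_neg (by omega)]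
  · rw [if_neg h1]
    by_cases h2 : k = i
    · subst h2; simp
    · by_cases h3 : k = i + 1
      · subst h3
        have : i + 1 - i = 1 := by omega
        rw [this]; simp
      · rw [if_neg h2, if_neg h3]
        rw [if_neg (show ¬ (k - i < ([b[i+1]?.getD ' ', b[i]?.getD ' '] : List Char).length) by simp; omega)]
        rw [List.getElem?_drop]
        have : i + 2 + (k - i - ([b[i+1]?.getD ' ', b[i]?.getD ' '] : List Char).length) = k := by
          simp; omega
        rw [this]

theorem pvEq_of_getD (l l' : List Char) (hl : l.length = l'.length)
    (h : ∀ k, k < l.length → l.getD k ' ' = l'.getD k ' ') : l = l' := by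
  apply List.ext_getElem hl
  intro n h1 h2
  have := h n h1
  rwa [List.getD_eq_getElem l ' ' h1, List.getD_eq_getElem l' ' ' h2] at this

theorem pvPair_eq (l : List Nat) (hp : l.Pairwise (· < ·)) (i j : Nat) (hij : i < j)
    (hm : ∀ x, x ∈ l ↔ x = i ∨ x = j) : l = [i, j] := by
  match l, hp with
  | [], _ => exact absurd ((hm i).mpr (Or.inl rfl)) (by simp)
  | [a], _ =>
    have h1 : i = a := by simpa using (hm i).mpr (Or.inl rfl)
    have h2 : j = a := by simpa using (hm j).mpr (Or.inr rfl)
    omega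
  | a :: c :: t, hp =>
    have hlt : ∀ x ∈ c :: t, a < x := by
      intro x hx; exact (List.pairwise_cons.mp hp).1 x hx
    have hai : a = i := by
      rcases (hm a).mp (by simp) with h | h
      · exact h
      · subst h
        have hi : i ∈ a :: c :: t := (hm i).mpr (Or.inl rfl)
        rcases List.mem_cons.mp hi with h | h
        · omega
        · have := hlt i h; omega
    subst hai
    have hcj : c = j := by
      rcases (hm c).mp (by simp) with h | h
      · have := hlt c (by simp); omega
      · exact h
    subst hcj
    have ht : t = [] := by
      cases t with
      | nil => rfl
      | cons x xs =>
        have hx := (hm x).mp (by simp)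
        have h1 := hlt x (by simp)
        have h2 : c < x := by
          have := (List.pairwise_cons.mp hp).2
          exact (List.pairwise_cons.mp this).1 x (by simp)
        omega
    rw [ht]

theorem pvSwapA_natCast (b : List Char) (i : Nat) (hi : i + 1 < b.length) :
    pvSwapA b (i : Int) = pvSw b i := by
  unfold pvSwapA pvSw
  have e1 : (i:Int) + 1 = ((i+1 : Nat) : Int) := by push_cast; ring
  have e2 : (i:Int) + 2 = ((i+2 : Nat) : Int) := by push_cast; ring
  rw [e1, e2, PySem.List.slice_to_natCast, PySem.List.slice_from_natCast,
    PySem.List.pyGet?_natCast, PySem.List.pyGet?_natCast,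
    List.getElem?_eq_getElem hi, List.getElem?_eq_getElem (by omega : i < b.length),
    List.getD_eq_getElem b ' ' hi, List.getD_eq_getElem b ' ' (by omega : i < b.length)]
  simp

theorem pvA_iff (d b : List Char) :
    ((PySem.List.pyRange 0 ((b.length : Int) - 1) 1).any
      (fun i => pvSwapA b i == d)) = true ↔ ∃ i : Nat, i + 1 < b.length ∧ pvSw b i = d := by
  rw [List.any_eq_true]
  constructor
  · rintro ⟨x, hx, hbe⟩
    rw [PySem.List.mem_pyRange_one] at hx
    obtain ⟨h0, h1⟩ := hx
    refine ⟨x.toNat, by omega, ?_⟩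
    rw [← pvSwapA_natCast b x.toNat (by omega)]
    rw [show ((x.toNat : Nat) : Int) = x by omega]
    exact eq_of_beq hbe
  · rintro ⟨i, hi, hsw⟩
    refine ⟨(i : Int), ?_, ?_⟩
    · rw [PySem.List.mem_pyRange_one]; omega
    · rw [pvSwapA_natCast b i hi, hsw]; simp

theorem pvSw_length (b : List Char) (i : Nat) (hi : i + 1 < b.length) :
    (pvSw b i).length = b.length := by
  unfold pvSw; simp; omega

theorem pvMain (d b : List Char) (hlen : d.length = b.length) :
    ((PySem.List.pyRange 0 ((b.length : Int) - 1) 1).any (fun i => pvSwapA b i == d)) =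
      (match (List.range b.length).filter (fun k => !(d.getD k ' ' == b.getD k ' ')) with
       | [] => (List.range (b.length - 1)).any (fun i => b.getD i ' ' == b.getD (i + 1) ' ')
       | [i, j] => j == i + 1 && d.getD i ' ' == b.getD j ' ' && d.getD j ' ' == b.getD i ' '
       | _ => false) := by
  rw [Bool.eq_iff_iff, pvA_iff]
  set diffs := (List.range b.length).filter (fun k => !(d.getD k ' ' == b.getD k ' ')) with hdiffs
  have hmem : ∀ x, x ∈ diffs ↔ x < b.length ∧ d.getD x ' ' ≠ b.getD x ' ' := by
    intro x; rw [hdiffs, List.mem_filter, List.mem_range]; simp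
  have hsort : diffs.Pairwise (· < ·) := List.Pairwise.filter _ (List.pairwise_lt_range)
  constructor
  · rintro ⟨i, hi, hsw⟩
    have hgd : ∀ k, k < b.length → d.getD k ' ' =
        (if k = i then b.getD (i + 1) ' ' else if k = i + 1 then b.getD i ' ' else b.getD k ' ') := by
      intro k hk; rw [← hsw, pvSw_getD b i k hi hk]
    by_cases hc : b.getD i ' ' = b.getD (i + 1) ' '
    · have hnil : diffs = [] := by
        rw [hdiffs, List.filter_eq_nil_iff]
        intro k hk
        rw [List.mem_range] at hk
        have := hgd k hk
        simp only [Bool.not_eq_true']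
        split_ifs at this with h1 h2
        · subst h1; rw [this, hc]; simp
        · subst h2; rw [this, hc]; simp
        · rw [this]; simp
      rw [hnil]
      rw [List.any_eq_true]
      exact ⟨i, List.mem_range.mpr (by omega), by simpa using hc⟩
    · have hpair : diffs = [i, i + 1] := by
        apply pvPair_eq diffs hsort i (i + 1) (by omega)
        intro x
        rw [hmem x]
        constructor
        · rintro ⟨hx, hne⟩
          have := hgd x hx
          split_ifs at this with h1 h2
          · exact Or.inl h1
          · exact Or.inr h2
          · exact absurd this hne
        · rintro (h | h)
          · refine ⟨by omega, ?_⟩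
            rw [h, hgd i (by omega), if_pos rfl]
            exact fun hh => hc hh.symm
          · refine ⟨by omega, ?_⟩
            rw [h, hgd (i+1) hi, if_neg (by omega), if_pos rfl]
            exact fun hh => hc hh
      rw [hpair]
      simp only [beq_self_eq_true, Bool.true_and, Bool.and_eq_true, beq_iff_eq]
      exact ⟨by rw [hgd i (by omega), if_pos rfl], by rw [hgd (i+1) hi, if_neg (by omega), if_pos rfl]⟩
  · intro hB
    rcases hd : diffs with _ | ⟨i, _ | ⟨j, _ | t⟩⟩ <;> rw [hd] at hB
    · have heq : ∀ k, k < b.length → d.getD k ' ' = b.getD k ' ' := by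
        intro k hk
        by_contra hne
        have : k ∈ diffs := (hmem k).mpr ⟨hk, hne⟩
        rw [hd] at this; simp at this
      rw [List.any_eq_true] at hB
      obtain ⟨x, hx, hbe⟩ := hB
      rw [List.mem_range] at hx
      rw [beq_iff_eq] at hbe
      refine ⟨x, by omega, ?_⟩
      apply pvEq_of_getD _ _ (by rw [pvSw_length b x (by omega), hlen])
      intro k hk
      rw [pvSw_length b x (by omega)] at hk
      rw [pvSw_getD b x k (by omega) hk, heq k hk]
      split_ifs with h1 h2
      · subst h1; exact hbe.symm
      · subst h2; exact hbe
      · rfl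
    · simp at hB
    · simp only [Bool.and_eq_true, beq_iff_eq] at hB
      obtain ⟨⟨hj, h1⟩, h2⟩ := hB
      subst hj
      have hi2 : i ∈ diffs := by rw [hd]; simp
      have hj2 : i + 1 ∈ diffs := by rw [hd]; simp
      rw [hmem] at hi2 hj2
      refine ⟨i, hj2.1, ?_⟩
      apply pvEq_of_getD _ _ (by rw [pvSw_length b i hj2.1, hlen])
      intro k hk
      rw [pvSw_length b i hj2.1] at hk
      rw [pvSw_getD b i k hj2.1 hk]
      split_ifs with hk1 hk2
      · subst hk1; exact h1.symm
      · subst hk2; exact h2.symm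
      · by_contra hne
        have : k ∈ diffs := (hmem k).mpr ⟨hk, fun h => hne h.symm⟩
        rw [hd] at this
        simp at this
        omega
    · simp at hB

-- ===== VERDICT (by name: the statement is the Claim_ definition above) =====
theorem is_transposition_py_spec : Claim_equal_is_transposition_py := by
  intro domain brand _
  unfold Spec_is_transposition_py is_transposition_py is_transposition_py_alt
  dsimp only
  by_cases h : domain.toList.length = brand.toList.length
  · rw [if_neg (by simp [h]), if_neg (by simp [h])]
    exact pvMain domain.toList brand.toList h
  · rw [if_pos h, if_pos h]
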